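-- pv_equiv track=rewrite | github.com/vijay9908/Codechef | EOEO.py | gamer
-- ===== SOURCE A (Python) =====
-- def gamer(n):
--     status = True
--     if n%2 != 0:
--         jerrys = list(range(2,n,2))
--         for ele in jerrys:
--             if n%2 == 0 and ele%2 == 0:
--                 n , ele = n//2 , ele//2
--             elif n%2 != 0 and ele%2 != 0:
--                 jerrys.remove(ele)
--             elif n%2==0 and ele%2!=0:
--                 jerrys.remove(ele)
--         return len(jerrys)
--     else:
--         jerrys = list(range(1,n+1,2))
--         for ele in jerrys:
--             if n%2 == 0 and ele%2 == 0:
--                 n , ele = n//2 , ele//2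
--             elif n%2 != 0 and ele%2 != 0:
--                 jerrys.remove(ele)
--             elif n%2==0 and ele%2!=0:
--                 jerrys.remove(ele)
--         return len(jerrys)
-- ===== SOURCE B (Python) =====
-- def gamer(n):
--     if n <= 0:
--         return 0
--     if n % 2:
--         return (n - 1) // 2
--     return n // 4
-- ===== Notes on version B (the rewrite author's own statement) =====
-- stated objective: faster
-- what changed: Replaced the quadratic remove-during-iteration list simulation with a constant-time closed-form parity formula on n.
import Mathlib
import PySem

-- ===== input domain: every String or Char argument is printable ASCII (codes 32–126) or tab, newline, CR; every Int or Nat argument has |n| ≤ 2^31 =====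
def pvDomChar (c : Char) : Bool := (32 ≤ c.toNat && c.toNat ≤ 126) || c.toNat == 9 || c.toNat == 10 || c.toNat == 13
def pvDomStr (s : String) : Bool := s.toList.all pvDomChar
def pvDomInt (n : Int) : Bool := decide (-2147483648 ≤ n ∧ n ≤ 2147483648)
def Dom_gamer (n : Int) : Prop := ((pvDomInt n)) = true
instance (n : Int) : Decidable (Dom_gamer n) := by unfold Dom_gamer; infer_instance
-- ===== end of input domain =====

-- B replaces A's quadratic remove-during-iteration list simulation by the closed form
-- 0 / (n-1)//2 / n//4; objective: faster (asymptotic, O(1) vs O(n^2)).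

-- ===== PORT A =====
-- Python's `for ele in jerrys` over the mutating list, index-based: at step i read
-- jerrys[i] if it exists; `jerrys.remove(ele)` is PySem.List.remove?.  The fuel is the
-- initial list length: i grows by 1 each step and the list never grows, so it suffices.
def gamerLoop (fuel : Nat) (n : Int) (js : List Int) (i : Nat) : List Int :=
  match fuel with
  | 0 => js
  | fuel + 1 =>
    if h : i < js.length then
      let ele := js[i]
      if PySem.Int.mod n 2 = 0 ∧ PySem.Int.mod ele 2 = 0 then
        -- n, ele = n//2, ele//2  (the new ele is dead: the loop variable is reassigned next step)
        gamerLoop fuel (PySem.Int.floordiv n 2) js (i + 1)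
      else if PySem.Int.mod n 2 ≠ 0 ∧ PySem.Int.mod ele 2 ≠ 0 then
        gamerLoop fuel n ((PySem.List.remove? js ele).getD js) (i + 1)
      else if PySem.Int.mod n 2 = 0 ∧ PySem.Int.mod ele 2 ≠ 0 then
        gamerLoop fuel n ((PySem.List.remove? js ele).getD js) (i + 1)
      else
        gamerLoop fuel n js (i + 1)
    else js

def gamer (n : Int) : Int :=
  if PySem.Int.mod n 2 ≠ 0 then
    let jerrys := PySem.List.pyRange 2 n 2
    ((gamerLoop jerrys.length n jerrys 0).length : Int)
  else
    let jerrys := PySem.List.pyRange 1 (n + 1) 2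
    ((gamerLoop jerrys.length n jerrys 0).length : Int)

-- ===== PORT B =====
def gamer_alt (n : Int) : Int :=
  if n ≤ 0 then 0
  else if PySem.Int.mod n 2 ≠ 0 then PySem.Int.floordiv (n - 1) 2
  else PySem.Int.floordiv n 4

-- ===== PRECONDITION & SPEC =====
def Spec_gamer (n : Int) (out : Int) : Prop := out = gamer_alt n
instance (n : Int) (out : Int) : Decidable (Spec_gamer n out) := by unfold Spec_gamer; infer_instance

-- ===== CLAIM (what is proved, stated in full; the proofs are below) =====
def Claim_equal_gamer : Prop := ∀ (n : Int), Dom_gamer n → Spec_gamer n (gamer n)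

-- ===== LEMMAS AND PROOFS =====

-- With n odd and every list element even, no branch of the loop body fires: the list is unchanged.
theorem gamerLoop_odd (fuel : Nat) (n : Int) (hn : PySem.Int.mod n 2 ≠ 0) :
    ∀ (js : List Int) (i : Nat), (∀ x ∈ js, PySem.Int.mod x 2 = 0) →
      gamerLoop fuel n js i = js := by
  induction fuel with
  | zero => intro js i _; rfl
  | succ fuel ih =>
    intro js i hall
    unfold gamerLoop
    by_cases h : i < js.length
    · have hele : PySem.Int.mod js[i] 2 = 0 := hall _ (js.getElem_mem h)
      simp only [h, dif_pos]
      rw [if_neg (by tauto), if_neg (fun hc => hc.2 hele), if_neg (by tauto)]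
      exact ih js (i + 1) hall
    · simp [h]

-- With n even and every list element odd, each step removes the element at the cursor:
-- final length = len - ⌈(len - i)/2⌉.
theorem gamerLoop_even (fuel : Nat) (n : Int) (hn : PySem.Int.mod n 2 = 0) :
    ∀ (js : List Int) (i : Nat), (∀ x ∈ js, PySem.Int.mod x 2 ≠ 0) → js.Nodup →
      js.length ≤ fuel + i →
      (gamerLoop fuel n js i).length = js.length - (js.length - i + 1) / 2 := by
  induction fuel with
  | zero =>
    intro js i _ _ hf
    have : js.length - i = 0 := by omega
    simp [gamerLoop, this]
  | succ fuel ih =>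
    intro js i hall hnd hf
    unfold gamerLoop
    by_cases h : i < js.length
    · have hmem : js[i] ∈ js := js.getElem_mem h
      have hele : PySem.Int.mod js[i] 2 ≠ 0 := hall _ hmem
      simp only [h, dif_pos]
      rw [if_neg (by tauto), if_neg (by tauto), if_pos ⟨hn, hele⟩]
      rw [PySem.List.remove?_eq_some_erase js js[i] hmem]
      simp only [Option.getD_some]
      have hlen : (js.erase js[i]).length = js.length - 1 := js.length_erase_of_mem hmem
      rw [ih (js.erase js[i]) (i + 1)
        (fun x hx => hall x (js.mem_of_mem_erase hx)) (hnd.erase _) (by omega)]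
      omega
    · simp only [h, dif_neg, not_false_iff]
      have : js.length - i = 0 := by omega
      simp [this]

theorem pyRange2_mem_even (a b x : Int) (ha : PySem.Int.mod a 2 = 0)
    (hx : x ∈ PySem.List.pyRange a b 2) : PySem.Int.mod x 2 = 0 := by
  obtain ⟨_, _, k, hk⟩ := (PySem.List.mem_pyRange_iff_of_pos (by norm_num) x).mp hx
  simp only [PySem.Int.mod, Int.fmod_eq_emod] at *
  omega

theorem pyRange2_mem_odd (a b x : Int) (ha : PySem.Int.mod a 2 ≠ 0)
    (hx : x ∈ PySem.List.pyRange a b 2) : PySem.Int.mod x 2 ≠ 0 := by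
  obtain ⟨_, _, k, hk⟩ := (PySem.List.mem_pyRange_iff_of_pos (by norm_num) x).mp hx
  simp only [PySem.Int.mod, Int.fmod_eq_emod] at *
  omega

theorem pyRange2_nodup (a b : Int) : (PySem.List.pyRange a b 2).Nodup := by
  rw [PySem.List.pyRange_of_pos a b (by norm_num)]
  exact (List.nodup_range).map (fun x y hxy => by omega)

theorem pyRange2_length (a b : Int) :
    (PySem.List.pyRange a b 2).length = if a < b then ((b - a + 1) / 2).toNat else 0 := by
  rw [PySem.List.pyRange_of_pos a b (by norm_num)]
  simp only [List.length_map, List.length_range]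
  have h2 : b - a + 2 - 1 = b - a + 1 := by ring
  rw [h2]

-- ===== VERDICT (by name: the statement is the Claim_ definition above) =====
theorem gamer_spec : Claim_equal_gamer := by
  intro n _
  have hfd : ∀ a : Int, PySem.Int.floordiv a 2 = a / 2 := fun a => by
    simp only [PySem.Int.floordiv]; rw [Int.fdiv_eq_ediv]; norm_num
  have hfd4 : ∀ a : Int, PySem.Int.floordiv a 4 = a / 4 := fun a => by
    simp only [PySem.Int.floordiv]; rw [Int.fdiv_eq_ediv]; norm_num
  unfold Spec_gamer gamer gamer_alt
  by_cases hodd : PySem.Int.mod n 2 ≠ 0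
  · have hmod : n % 2 ≠ 0 := by
      simpa [PySem.Int.mod, Int.fmod_eq_emod] using hodd
    rw [if_pos hodd]
    show ((gamerLoop (PySem.List.pyRange 2 n 2).length n (PySem.List.pyRange 2 n 2) 0).length : Int) = _
    rw [gamerLoop_odd _ n hodd _ 0 (fun x hx => pyRange2_mem_even 2 n x (by decide) hx)]
    rw [pyRange2_length]
    rw [if_pos hodd, hfd]
    split_ifs <;> omega
  · have hmod : n % 2 = 0 := by
      by_contra hc
      exact hodd (by simpa [PySem.Int.mod, Int.fmod_eq_emod] using hc)
    rw [if_neg hodd]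
    rw [not_not] at hodd
    show ((gamerLoop (PySem.List.pyRange 1 (n+1) 2).length n (PySem.List.pyRange 1 (n+1) 2) 0).length : Int) = _
    rw [gamerLoop_even _ n hodd _ 0
      (fun x hx => pyRange2_mem_odd 1 (n + 1) x (by decide) hx) (pyRange2_nodup _ _)
      (by omega)]
    rw [pyRange2_length]
    rw [if_neg (by simpa [PySem.Int.mod, Int.fmod_eq_emod] using hmod : ¬ PySem.Int.mod n 2 ≠ 0), hfd4]
    split_ifs <;> omega
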